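-- pv_equiv track=rewrite | github.com/anishfelixm/100daysofCP | python/46d_1915B_NotQuiteLatinSquare.py | func
-- ===== SOURCE A (Python) =====
-- def func(s):
--     check = [0, 0, 0]
--     for i in s:
--         if i == "A":
--             check[0] = 1
--         elif i == "B":
--             check[1] = 1
--         elif i == "C":
--             check[2] = 1
--     if check[0] == 0:
--         return "A"
--     elif check[1] == 0:
--         return "B"
--     else:
--         return "C"
-- ===== SOURCE B (Python) =====
-- def func(s):
--     for c in "ABC":
--         if c not in s:
--             return c
--     return "C"
-- ===== Notes on version B (the rewrite author's own statement) =====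
-- stated objective: simpler
-- what changed: B scans the fixed three-letter candidate alphabet and returns the first letter absent from s via a substring membership test, instead of A's character-by-character pass over s building a presence table.
import Mathlib
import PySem

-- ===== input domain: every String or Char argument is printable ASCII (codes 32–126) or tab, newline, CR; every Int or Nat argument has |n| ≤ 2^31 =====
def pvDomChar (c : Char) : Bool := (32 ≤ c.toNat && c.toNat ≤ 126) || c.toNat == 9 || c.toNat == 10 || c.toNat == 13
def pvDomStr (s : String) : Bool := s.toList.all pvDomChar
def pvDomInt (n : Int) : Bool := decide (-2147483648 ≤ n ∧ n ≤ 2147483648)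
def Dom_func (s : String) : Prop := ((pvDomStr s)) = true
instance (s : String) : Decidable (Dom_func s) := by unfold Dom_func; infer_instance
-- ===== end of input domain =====

-- B replaces A's presence-table pass over s with a scan of the candidate alphabet "ABC",
-- returning the first letter absent from s — simpler by a different decomposition (C-level membership test instead of a Python loop).


-- ===== PORT A =====
def func (s : String) : String :=
  let check := s.toList.foldl
    (fun (ch : Bool × Bool × Bool) i =>
      if i = 'A' then (true, ch.2.1, ch.2.2)
      else if i = 'B' then (ch.1, true, ch.2.2)
      else if i = 'C' then (ch.1, ch.2.1, true)
      else ch)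
    (false, false, false)
  if check.1 = false then "A"
  else if check.2.1 = false then "B"
  else "C"

-- ===== PORT B =====
-- `c not in s` for a single character c is char membership; exact here.
def funcAltGo (s : String) : List Char → String
  | [] => "C"
  | c :: rest => if ¬ (s.toList.contains c) then String.ofList [c] else funcAltGo s rest

def func_alt (s : String) : String := funcAltGo s ['A', 'B', 'C']

-- ===== PRECONDITION & SPEC =====
def Spec_func (s : String) (out : String) : Prop := out = func_alt s
instance (s : String) (out : String) : Decidable (Spec_func s out) := by unfold Spec_func; infer_instance

-- ===== CLAIM (what is proved, stated in full; the proofs are below) =====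
def Claim_equal_func : Prop := ∀ (s : String), Dom_func s → Spec_func s (func s)

-- ===== LEMMAS AND PROOFS =====
theorem func_fold_char (l : List Char) (a b c : Bool) :
    l.foldl
      (fun (ch : Bool × Bool × Bool) i =>
        if i = 'A' then (true, ch.2.1, ch.2.2)
        else if i = 'B' then (ch.1, true, ch.2.2)
        else if i = 'C' then (ch.1, ch.2.1, true)
        else ch)
      (a, b, c)
    = (a || l.contains 'A', b || l.contains 'B', c || l.contains 'C') := by
  induction l generalizing a b c with
  | nil => simp
  | cons x xs ih =>
    by_cases hA : x = 'A'
    · simp [hA, ih]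
    · by_cases hB : x = 'B'
      · simp [hB, ih]
      · by_cases hC : x = 'C'
        · simp [hC, ih]
        · simp [hA, hB, hC, ih, Ne.symm hA, Ne.symm hB, Ne.symm hC]

-- ===== VERDICT (by name: the statement is the Claim_ definition above) =====
theorem func_spec : Claim_equal_func := by
  intro s _
  unfold Spec_func func func_alt
  rw [func_fold_char]
  by_cases hA : 'A' ∈ s.toList <;> by_cases hB : 'B' ∈ s.toList <;>
    simp [funcAltGo, hA, hB] <;> intros <;> rfl
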